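-- pv_equiv track=rewrite | github.com/alfredr/parajudica | inference/src/inference/cli.py | _find_root_containers
-- ===== SOURCE A (Python) =====
-- def _find_root_containers(
--     scope_containers: set[str],
--     children: dict[str, list[str]],
-- ) -> set[str]:
--     """Find root containers in a scope."""
--     roots = set()
--
--     for container in scope_containers:
--         has_parent_in_scope = any(
--             container in child_list and parent in scope_containers
--             for parent, child_list in children.items()
--         )
--
--         if not has_parent_in_scope:
--             roots.add(container)
--
--     return roots
-- ===== SOURCE B (Python) =====
-- def _find_root_containers(
--     scope_containers: set[str],
--     children: dict[str, list[str]],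
-- ) -> set[str]:
--     """Find root containers in a scope (edge-centric single pass)."""
--     non_roots = set()
--     for parent, child_list in children.items():
--         if parent in scope_containers:
--             non_roots.update(child_list)
--     return scope_containers - non_roots
-- ===== Notes on version B (the rewrite author's own statement) =====
-- stated objective: faster
-- what changed: Replaces A's per-container scan over all (parent, child_list) edges with one edge-centric pass that accumulates a non_roots set of all children of in-scope parents, returning the set difference scope_containers - non_roots.
import Mathlib
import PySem

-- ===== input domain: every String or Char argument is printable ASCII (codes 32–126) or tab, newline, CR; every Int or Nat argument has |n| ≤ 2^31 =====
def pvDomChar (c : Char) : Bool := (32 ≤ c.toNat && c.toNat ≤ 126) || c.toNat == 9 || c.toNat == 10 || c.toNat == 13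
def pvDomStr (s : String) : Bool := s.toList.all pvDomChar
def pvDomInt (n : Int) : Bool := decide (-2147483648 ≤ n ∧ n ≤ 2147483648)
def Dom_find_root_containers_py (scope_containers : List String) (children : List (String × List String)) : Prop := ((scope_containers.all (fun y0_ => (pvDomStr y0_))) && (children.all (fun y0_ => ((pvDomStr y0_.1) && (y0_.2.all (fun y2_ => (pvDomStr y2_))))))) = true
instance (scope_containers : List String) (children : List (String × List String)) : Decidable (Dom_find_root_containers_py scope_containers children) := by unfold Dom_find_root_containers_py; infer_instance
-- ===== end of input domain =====

-- B replaces A's per-container scan of every (parent, child_list) edge with one edge-centric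
-- pass building a non_roots set, then a single set difference (asymptotically fewer scans).

-- ===== PORT A =====
def find_root_containers_py (scope_containers : List String) (children : List (String × List String)) : List String :=
  scope_containers.foldl
    (fun roots container =>
      let has_parent_in_scope :=
        children.any (fun pc => pc.2.contains container && scope_containers.contains pc.1)
      if has_parent_in_scope then roots else PySem.Set.add roots container)
    PySem.Set.empty

-- ===== PORT B =====
def find_root_containers_py_alt (scope_containers : List String) (children : List (String × List String)) : List String :=
  let non_roots :=
    children.foldl
      (fun nr pc => if scope_containers.contains pc.1 then PySem.Set.update nr pc.2 else nr)
      PySem.Set.empty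
  PySem.Set.diff scope_containers non_roots

-- ===== PRECONDITION & SPEC =====
-- Pre_ states the Python representation invariant of the 'set[str]' argument: its List String
-- encoding holds distinct elements. It excludes no Python set input.
def Pre_find_root_containers_py (scope_containers : List String) (children : List (String × List String)) : Prop :=
  scope_containers.Nodup

instance (scope_containers : List String) (children : List (String × List String)) : Decidable (Pre_find_root_containers_py scope_containers children) := by unfold Pre_find_root_containers_py; infer_instance

def pvWitness_find_root_containers_py : List String × (List (String × List String)) :=
  (["a", "b", "c"], [("a", ["b"]), ("z", ["c"])])

def Spec_find_root_containers_py (scope_containers : List String) (children : List (String × List String)) (out : List String) : Prop := out = find_root_containers_py_alt scope_containers children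
instance (scope_containers : List String) (children : List (String × List String)) (out : List String) : Decidable (Spec_find_root_containers_py scope_containers children out) := by unfold Spec_find_root_containers_py; infer_instance

-- ===== CLAIM (what is proved, stated in full; the proofs are below) =====
def Claim_equal_find_root_containers_py : Prop := ∀ (scope_containers : List String) (children : List (String × List String)), Dom_find_root_containers_py scope_containers children → Pre_find_root_containers_py scope_containers children → Spec_find_root_containers_py scope_containers children (find_root_containers_py scope_containers children)

-- ===== LEMMAS AND PROOFS =====

-- A's fold over a duplicate-free scope is a filter.
theorem pvA_foldl_filter {p : String → Bool} :
    ∀ (l r : List String), l.Nodup → (∀ c ∈ l, c ∉ r) →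
      l.foldl (fun roots c => if p c then roots else PySem.Set.add roots c) r
        = r ++ l.filter (fun c => !p c) := by
  intro l
  induction l with
  | nil => intro r _ _; simp
  | cons a l ih =>
    intro r hnd hfresh
    simp only [List.foldl_cons, List.filter_cons]
    by_cases hp : p a = true
    · simp only [hp, if_true, Bool.not_true]
      rw [ih r (List.nodup_cons.mp hnd).2 (fun c hc => hfresh c (List.mem_cons_of_mem _ hc))]
      simp
    · have hpa : p a = false := by simpa using hp
      have hna : a ∉ r := hfresh a (List.mem_cons_self)
      have hadd : (if p a = true then r else PySem.Set.add r a) = r ++ [a] := by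
        simp [hpa, PySem.Set.add, List.contains_eq_mem, hna]
      rw [hadd, ih (r ++ [a]) (List.nodup_cons.mp hnd).2]
      · simp [hpa]
      · intro c hc
        simp only [List.mem_append, List.mem_singleton]
        rintro (h | rfl)
        · exact hfresh c (List.mem_cons_of_mem _ hc) h
        · exact (List.nodup_cons.mp hnd).1 hc

-- Membership in B's accumulated non_roots set.
theorem pvB_contains {scope : List String} :
    ∀ (ch : List (String × List String)) (nr : PySem.Set String) (x : String),
      (ch.foldl (fun nr pc => if scope.contains pc.1 then PySem.Set.update nr pc.2 else nr) nr).contains x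
        = (nr.contains x || ch.any (fun pc => pc.2.contains x && scope.contains pc.1)) := by
  intro ch
  induction ch with
  | nil => intro nr x; simp
  | cons pc ch ih =>
    intro nr x
    simp only [List.foldl_cons, List.any_cons]
    by_cases hs : scope.contains pc.1 = true
    · rw [if_pos hs, ih]
      have hupd : (PySem.Set.update nr pc.2).contains x = (nr.contains x || pc.2.contains x) := by
        simp [PySem.Set.contains, List.contains_eq_mem, PySem.Set.mem_update]
      rw [hupd, hs]
      cases nr.contains x <;> cases pc.2.contains x <;> simp
    · have hs' : scope.contains pc.1 = false := by simpa using hs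
      rw [if_neg hs, ih, hs']
      cases nr.contains x <;> simp

-- ===== VERDICT (by name: the statement is the Claim_ definition above) =====
theorem find_root_containers_py_spec : Claim_equal_find_root_containers_py := by
  intro scope children _hdom hpre
  unfold Spec_find_root_containers_py find_root_containers_py find_root_containers_py_alt
  rw [pvA_foldl_filter scope PySem.Set.empty hpre (by simp [PySem.Set.empty])]
  simp only [PySem.Set.empty, List.nil_append, PySem.Set.diff]
  apply List.filter_congr
  intro x _
  rw [pvB_contains children ([]) x]
  simp [PySem.Set.contains, Bool.and_comm]
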